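-- pv_equiv track=rewrite | github.com/MichaelLeachim/leetcode | python/devtest/devtest.py | mergeConsequentItems
-- ===== SOURCE A (Python) =====
-- def mergeConsequentItems(s):
--   first,last,hours = s[0][0],s[0][0],s[0][1]
--   solution = [[first,last,hours]]
--   for day,hours in s[1:]:
--     lastInSolution = len(solution)-1
--     (prevDayFirst,prevDayLast, prevHours) = solution[lastInSolution]
--     if prevHours == hours:
--       solution[lastInSolution] = [prevDayFirst,day,hours]
--       continue
--     solution.append([day,day,hours])
--   return solution
-- ===== SOURCE B (Python) =====
-- def mergeConsequentItems(s):
--     res = []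
--     i = 0
--     n = len(s)
--     while i < n:
--         d0, h = s[i]
--         j = i + 1
--         while j < n and s[j][1] == h:
--             j += 1
--         res.append([d0, s[j - 1][0], h])
--         i = j
--     return res
-- ===== Notes on version B (the rewrite author's own statement) =====
-- stated objective: alternative
-- what changed: B scans each maximal run of equal hours with an inner pointer and emits one range per run, instead of A's single pass that repeatedly reads and rewrites the last element of the growing solution list.
import Mathlib
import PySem

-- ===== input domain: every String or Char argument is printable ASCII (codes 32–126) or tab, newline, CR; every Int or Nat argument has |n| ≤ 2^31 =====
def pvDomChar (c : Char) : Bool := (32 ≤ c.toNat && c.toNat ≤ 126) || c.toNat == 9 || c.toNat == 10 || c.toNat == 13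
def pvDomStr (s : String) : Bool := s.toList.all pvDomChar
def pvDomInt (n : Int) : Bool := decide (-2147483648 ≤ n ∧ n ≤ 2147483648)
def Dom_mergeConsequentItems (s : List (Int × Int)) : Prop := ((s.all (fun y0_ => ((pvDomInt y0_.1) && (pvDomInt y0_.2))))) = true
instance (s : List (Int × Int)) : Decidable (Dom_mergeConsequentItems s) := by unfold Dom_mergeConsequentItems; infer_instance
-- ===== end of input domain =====

-- B scans each maximal run of equal hours and emits one range per run: an alternative decomposition
-- of the same O(n) merge; the empty list (on which A raises IndexError) is excluded by Pre_.


-- ===== PORT A =====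
-- one loop step of A: read solution[len-1], either rewrite it in place or append
def mergeAStep (sol : List (List Int)) (dh : Int × Int) : List (List Int) :=
  match sol.getLast? with
  | some [prevDayFirst, _prevDayLast, prevHours] =>
      if prevHours = dh.2 then sol.dropLast ++ [[prevDayFirst, dh.1, dh.2]]
      else sol ++ [[dh.1, dh.1, dh.2]]
  | _ => sol   -- unreachable: every element of solution is a 3-element list

def mergeConsequentItems (s : List (Int × Int)) : List (List Int) :=
  match s with
  | [] => []   -- Python A raises IndexError here; excluded by Pre_
  | (d0, h0) :: rest => rest.foldl mergeAStep [[d0, d0, h0]]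

-- ===== PORT B =====
def mergeConsequentItems_alt (s : List (Int × Int)) : List (List Int) :=
  match s with
  | [] => []
  | (d0, h) :: t =>
      [d0, ((t.takeWhile (fun p => p.2 == h)).getLastD (d0, h)).1, h] ::
        mergeConsequentItems_alt (t.dropWhile (fun p => p.2 == h))
termination_by s.length
decreasing_by
  simpa using Nat.lt_succ_of_le (List.length_dropWhile_le _ _)

-- ===== PRECONDITION & SPEC =====
-- Pre_ excludes only the empty list, on which Python A raises IndexError (s[0]).
def Pre_mergeConsequentItems (s : List (Int × Int)) : Prop := s ≠ []
instance (s : List (Int × Int)) : Decidable (Pre_mergeConsequentItems s) := by unfold Pre_mergeConsequentItems; infer_instance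
def pvWitness_mergeConsequentItems : (List (Int × Int)) := [(1, 8), (2, 8), (3, 6)]

def Spec_mergeConsequentItems (s : List (Int × Int)) (out : List (List Int)) : Prop := out = mergeConsequentItems_alt s
instance (s : List (Int × Int)) (out : List (List Int)) : Decidable (Spec_mergeConsequentItems s out) := by unfold Spec_mergeConsequentItems; infer_instance

-- ===== CLAIM (what is proved, stated in full; the proofs are below) =====
def Claim_equal_mergeConsequentItems : Prop := ∀ (s : List (Int × Int)), Dom_mergeConsequentItems s → Pre_mergeConsequentItems s → Spec_mergeConsequentItems s (mergeConsequentItems s)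

-- ===== LEMMAS AND PROOFS =====

-- spec-level description of A's loop continuing a run [f, l, h]
def mergeG (f l h : Int) : List (Int × Int) → List (List Int)
  | [] => [[f, l, h]]
  | (d, h') :: t => if h' = h then mergeG f d h t else [f, l, h] :: mergeG d d h' t

lemma foldl_mergeAStep (rest : List (Int × Int)) :
    ∀ (pre : List (List Int)) (f l h : Int),
      rest.foldl mergeAStep (pre ++ [[f, l, h]]) = pre ++ mergeG f l h rest := by
  induction rest with
  | nil => intro pre f l h; simp [mergeG]
  | cons dh t ih =>
      intro pre f l h
      obtain ⟨d, h'⟩ := dh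
      by_cases hh : h = h'
      · have : mergeAStep (pre ++ [[f, l, h]]) (d, h') = pre ++ [[f, d, h']] := by
          simp [mergeAStep, hh]
        rw [List.foldl_cons, this, ih pre f d h', mergeG, if_pos hh.symm, hh]
      · have : mergeAStep (pre ++ [[f, l, h]]) (d, h') =
            (pre ++ [[f, l, h]]) ++ [[d, d, h']] := by
          simp [mergeAStep, hh]
        rw [List.foldl_cons, this,
          ih (pre ++ [[f, l, h]]) d d h', mergeG,
          if_neg (fun e => hh e.symm)]
        simp
  
-- compute the day of the last entry of a run, default l
def lastDay (l : Int) : List (Int × Int) → Int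
  | [] => l
  | (d, _) :: t => lastDay d t

lemma alt_nil : mergeConsequentItems_alt [] = [] := by
  rw [mergeConsequentItems_alt]

lemma alt_cons (d0 h : Int) (t : List (Int × Int)) :
    mergeConsequentItems_alt ((d0, h) :: t) =
      [d0, ((t.takeWhile (fun p => p.2 == h)).getLastD (d0, h)).1, h] ::
        mergeConsequentItems_alt (t.dropWhile (fun p => p.2 == h)) := by
  rw [mergeConsequentItems_alt]

lemma getLastD_fst (run : List (Int × Int)) : ∀ (p : Int × Int),
    (run.getLastD p).1 = lastDay p.1 run := by
  induction run with
  | nil => intro p; rfl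
  | cons q t ih => intro p; rw [List.getLastD_cons, ih q]; rfl

lemma mergeG_eq_alt (t : List (Int × Int)) : ∀ (f l h : Int),
    mergeG f l h t =
      [f, lastDay l (t.takeWhile (fun p => p.2 == h)), h] ::
        mergeConsequentItems_alt (t.dropWhile (fun p => p.2 == h)) := by
  induction t with
  | nil => intro f l h; simp [mergeG, lastDay, alt_nil]
  | cons dh t ih =>
      intro f l h
      obtain ⟨d, h'⟩ := dh
      by_cases hh : h' = h
      · subst hh
        rw [mergeG, if_pos rfl, ih f d h']
        simp [lastDay]
      · rw [mergeG, if_neg hh,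
          List.takeWhile_cons_of_neg (by simpa using hh),
          List.dropWhile_cons_of_neg (by simpa using hh),
          alt_cons, getLastD_fst, ih d d h']
        rfl

-- ===== VERDICT (by name: the statement is the Claim_ definition above) =====
theorem mergeConsequentItems_spec : Claim_equal_mergeConsequentItems := by
  intro s _ hpre
  unfold Spec_mergeConsequentItems
  match s with
  | [] => exact absurd rfl hpre
  | (d0, h0) :: rest =>
      rw [show mergeConsequentItems ((d0, h0) :: rest) =
          rest.foldl mergeAStep [[d0, d0, h0]] from rfl]
      rw [show ([[d0, d0, h0]] : List (List Int)) = [] ++ [[d0, d0, h0]] from rfl,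
        foldl_mergeAStep, List.nil_append, mergeG_eq_alt, alt_cons, getLastD_fst]
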